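-- pv_equiv track=rewrite | github.com/RaiBP/incidental-bilingualism | language_detection.py | obtain_groups_and_ambiguous_groups_from_labels
-- ===== SOURCE A (Python) =====
-- def obtain_groups_and_ambiguous_groups_from_labels(labels, ambiguous_indices, ambiguous_threshold):
--     groups = []
--     ambiguous_groups = []
--     current_group = []
--     ambiguous_count = 0
--
--     for i, label in enumerate(labels):
--         if i == 0 or label == labels[i - 1]:
--             # we form our group with consecutive labels
--             current_group.append(i)
--             if i in ambiguous_indices:
--                 # if our current word is ambiguous, we increment the ambiguous count
--                 ambiguous_count += 1
--         else:
--             # if the current label is different from the previous one, we start a new group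
--             groups.append(current_group)
--             if ambiguous_count > ambiguous_threshold:
--                 # if the ambiguous count is greater than the threshold, we add the group to the ambiguous groups
--                 ambiguous_groups.append(current_group)
--             # we reset the ambiguous count and start a new group
--             ambiguous_count = 0
--             current_group = [i]
--
--     # we add the last group
--     groups.append(current_group)
--     if ambiguous_count > ambiguous_threshold:
--         ambiguous_groups.append(current_group)
--     return groups, ambiguous_groups
-- ===== SOURCE B (Python) =====
-- def obtain_groups_and_ambiguous_groups_from_labels(labels, ambiguous_indices, ambiguous_threshold):
--     # Phase 1: build maximal runs of consecutive equal labels.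
--     groups = []
--     current_group = []
--     for i, label in enumerate(labels):
--         if i == 0 or label == labels[i - 1]:
--             current_group.append(i)
--         else:
--             groups.append(current_group)
--             current_group = [i]
--     groups.append(current_group)
--     # Phase 2: score each group by its ambiguous-index count.
--     aset = set(ambiguous_indices)
--     ambiguous_groups = [g for g in groups
--                         if sum(1 for i in g if i in aset) > ambiguous_threshold]
--     return groups, ambiguous_groups
-- ===== Notes on version B (the rewrite author's own statement) =====
-- stated objective: simpler
-- what changed: A's single interleaved loop with a running ambiguous counter reset at each group break is replaced by two separate phases: first build the runs of consecutive equal labels, then score every finished group by counting its members in a set built once from ambiguous_indices.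
-- intended difference: On inputs where some group starting at position s > 0 has exactly ambiguous_threshold + 1 of its members in ambiguous_indices and s itself is one of them, A omits that group from ambiguous_groups (its counter is reset at the break and the group's first index is never tested), while B includes it; counting every member of the group is the intended behaviour. — e.g. on obtain_groups_and_ambiguous_groups_from_labels(["a", "b"], [1], 0): A returns ([[0], [1]], []), B returns ([[0], [1]], [[1]])
import Mathlib
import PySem

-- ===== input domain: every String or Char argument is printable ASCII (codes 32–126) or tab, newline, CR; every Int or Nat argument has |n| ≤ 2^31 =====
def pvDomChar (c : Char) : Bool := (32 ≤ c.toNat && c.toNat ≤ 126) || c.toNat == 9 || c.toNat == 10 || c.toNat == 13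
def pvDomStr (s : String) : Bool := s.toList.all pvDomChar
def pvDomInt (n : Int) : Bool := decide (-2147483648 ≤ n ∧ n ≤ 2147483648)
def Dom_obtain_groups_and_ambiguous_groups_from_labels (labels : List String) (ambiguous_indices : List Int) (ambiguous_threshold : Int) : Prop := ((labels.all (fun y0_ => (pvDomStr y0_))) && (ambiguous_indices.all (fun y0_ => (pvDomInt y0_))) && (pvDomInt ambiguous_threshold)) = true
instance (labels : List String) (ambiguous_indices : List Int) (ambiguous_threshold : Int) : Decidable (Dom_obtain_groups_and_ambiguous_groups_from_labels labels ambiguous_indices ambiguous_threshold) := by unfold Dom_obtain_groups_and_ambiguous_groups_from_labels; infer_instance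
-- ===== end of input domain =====

-- B replaces A's single interleaved loop (running ambiguous counter reset at each group break) by two phases:
-- build the runs first, then score every finished group by membership in a set of the ambiguous indices.
-- Objective: simpler. A's running counter skips the first index of every non-initial group; B counts all
-- members, so B flags a group A misses exactly on the inputs described by D_ below (A's omission is a bug).

-- ===== PORT A =====
def pvALoop (labels : List String) (amb : List Int) (thr : Int)
    (items : List (Int × String)) (groups ambg : List (List Int)) (cur : List Int) (cnt : Int) :
    List (List Int) × List (List Int) :=
  match items with
  | [] => (groups ++ [cur], if cnt > thr then ambg ++ [cur] else ambg)
  | (i, label) :: rest =>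
    if i = 0 ∨ PySem.List.pyGet? labels (i - 1) = some label then
      pvALoop labels amb thr rest groups ambg (cur ++ [i]) (if i ∈ amb then cnt + 1 else cnt)
    else
      pvALoop labels amb thr rest (groups ++ [cur])
        (if cnt > thr then ambg ++ [cur] else ambg) [i] 0

def obtain_groups_and_ambiguous_groups_from_labels (labels : List String) (ambiguous_indices : List Int) (ambiguous_threshold : Int) : List (List Int) × List (List Int) :=
  pvALoop labels ambiguous_indices ambiguous_threshold (PySem.List.enumerate labels) [] [] [] 0

-- ===== PORT B =====
def pvBGroups (labels : List String) (items : List (Int × String))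
    (groups : List (List Int)) (cur : List Int) : List (List Int) :=
  match items with
  | [] => groups ++ [cur]
  | (i, label) :: rest =>
    if i = 0 ∨ PySem.List.pyGet? labels (i - 1) = some label then
      pvBGroups labels rest groups (cur ++ [i])
    else
      pvBGroups labels rest (groups ++ [cur]) [i]

def obtain_groups_and_ambiguous_groups_from_labels_alt (labels : List String) (ambiguous_indices : List Int) (ambiguous_threshold : Int) : List (List Int) × List (List Int) :=
  let groups := pvBGroups labels (PySem.List.enumerate labels) [] []
  let aset : PySem.Set Int := PySem.Set.ofList ambiguous_indices
  (groups, groups.filter (fun g =>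
    ((g.filter (fun i => aset.contains i)).map (fun _ => (1 : Int))).sum > ambiguous_threshold))

-- ===== PRECONDITION & SPEC =====
-- A's running counter is reset to 0 when a group starts at s > 0 and the starting index s is never
-- re-tested for ambiguity, so A under-counts such a group by one when s ∈ ambiguous_indices; A then fails
-- to flag exactly the groups whose true ambiguous count is ambiguous_threshold + 1, while B flags them —
-- B's count of all group members is the intended one.
-- how many of the positions of the maximal run of equal labels starting at position s are ambiguous
def pvRunAmb (labels : List String) (a : List Int) (s : Nat) : Int :=
  ((List.range' s ((labels.drop s).takeWhile (· = labels.getD s "")).length).countP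
    (fun i => Int.ofNat i ∈ a) : Int)

def D_obtain_groups_and_ambiguous_groups_from_labels (labels : List String) (ambiguous_indices : List Int) (ambiguous_threshold : Int) : Prop :=
  ∃ s ∈ List.range labels.length,
    labels.getD (s - 1) "" ≠ labels.getD s "" ∧ (s : Int) ∈ ambiguous_indices ∧
    pvRunAmb labels ambiguous_indices s = ambiguous_threshold + 1
instance (labels : List String) (ambiguous_indices : List Int) (ambiguous_threshold : Int) : Decidable (D_obtain_groups_and_ambiguous_groups_from_labels labels ambiguous_indices ambiguous_threshold) := by unfold D_obtain_groups_and_ambiguous_groups_from_labels; infer_instance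

def Spec_obtain_groups_and_ambiguous_groups_from_labels (labels : List String) (ambiguous_indices : List Int) (ambiguous_threshold : Int) (out : List (List Int) × List (List Int)) : Prop := ¬ D_obtain_groups_and_ambiguous_groups_from_labels labels ambiguous_indices ambiguous_threshold → out = obtain_groups_and_ambiguous_groups_from_labels_alt labels ambiguous_indices ambiguous_threshold
instance (labels : List String) (ambiguous_indices : List Int) (ambiguous_threshold : Int) (out : List (List Int) × List (List Int)) : Decidable (Spec_obtain_groups_and_ambiguous_groups_from_labels labels ambiguous_indices ambiguous_threshold out) := by unfold Spec_obtain_groups_and_ambiguous_groups_from_labels; infer_instance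

def pvDiffWitness_obtain_groups_and_ambiguous_groups_from_labels : List String × List Int × Int := (["a", "b"], [1], 0)
def pvDiffWitnessOut_obtain_groups_and_ambiguous_groups_from_labels : (List (List Int) × List (List Int)) × (List (List Int) × List (List Int)) := (([[0], [1]], []), ([[0], [1]], [[1]]))

-- ===== CLAIM (what is proved, stated in full; the proofs are below) =====
def Claim_unchanged_obtain_groups_and_ambiguous_groups_from_labels : Prop := ∀ (labels : List String) (ambiguous_indices : List Int) (ambiguous_threshold : Int), Dom_obtain_groups_and_ambiguous_groups_from_labels labels ambiguous_indices ambiguous_threshold → Spec_obtain_groups_and_ambiguous_groups_from_labels labels ambiguous_indices ambiguous_threshold (obtain_groups_and_ambiguous_groups_from_labels labels ambiguous_indices ambiguous_threshold)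
def Claim_changed_obtain_groups_and_ambiguous_groups_from_labels : Prop := Dom_obtain_groups_and_ambiguous_groups_from_labels (pvDiffWitness_obtain_groups_and_ambiguous_groups_from_labels.1) (pvDiffWitness_obtain_groups_and_ambiguous_groups_from_labels.2.1) (pvDiffWitness_obtain_groups_and_ambiguous_groups_from_labels.2.2) ∧ D_obtain_groups_and_ambiguous_groups_from_labels (pvDiffWitness_obtain_groups_and_ambiguous_groups_from_labels.1) (pvDiffWitness_obtain_groups_and_ambiguous_groups_from_labels.2.1) (pvDiffWitness_obtain_groups_and_ambiguous_groups_from_labels.2.2) ∧ obtain_groups_and_ambiguous_groups_from_labels (pvDiffWitness_obtain_groups_and_ambiguous_groups_from_labels.1) (pvDiffWitness_obtain_groups_and_ambiguous_groups_from_labels.2.1) (pvDiffWitness_obtain_groups_and_ambiguous_groups_from_labels.2.2) = pvDiffWitnessOut_obtain_groups_and_ambiguous_groups_from_labels.1 ∧ obtain_groups_and_ambiguous_groups_from_labels_alt (pvDiffWitness_obtain_groups_and_ambiguous_groups_from_labels.1) (pvDiffWitness_obtain_groups_and_ambiguous_groups_from_labels.2.1) (pvDiffWitness_obtain_groups_and_ambiguous_groups_from_labels.2.2)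 = pvDiffWitnessOut_obtain_groups_and_ambiguous_groups_from_labels.2 ∧ pvDiffWitnessOut_obtain_groups_and_ambiguous_groups_from_labels.1 ≠ pvDiffWitnessOut_obtain_groups_and_ambiguous_groups_from_labels.2

def Claim_exact_obtain_groups_and_ambiguous_groups_from_labels : Prop := ∀ (labels : List String) (ambiguous_indices : List Int) (ambiguous_threshold : Int), Dom_obtain_groups_and_ambiguous_groups_from_labels labels ambiguous_indices ambiguous_threshold → D_obtain_groups_and_ambiguous_groups_from_labels labels ambiguous_indices ambiguous_threshold → obtain_groups_and_ambiguous_groups_from_labels labels ambiguous_indices ambiguous_threshold ≠ obtain_groups_and_ambiguous_groups_from_labels_alt labels ambiguous_indices ambiguous_threshold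

-- ===== LEMMAS AND PROOFS =====

-- label of position j
def pvLbl (labels : List String) (j : Nat) : String := labels.getD j ""

-- reference grouping: the runs that remain when positions js are still to be processed and cur is the open group
def pvRuns (labels : List String) (js : List Nat) (cur : List Int) : List (List Int) :=
  match js with
  | [] => [cur]
  | j :: rest =>
    if j = 0 ∨ pvLbl labels (j - 1) = pvLbl labels j then pvRuns labels rest (cur ++ [(j : Int)])
    else cur :: pvRuns labels rest [(j : Int)]

-- reference flagging with A's running counter
def pvFlagsA (labels : List String) (amb : List Int) (thr : Int) (js : List Nat) (cur : List Int) (cnt : Int) :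
    List (List Int) :=
  match js with
  | [] => if cnt > thr then [cur] else []
  | j :: rest =>
    if j = 0 ∨ pvLbl labels (j - 1) = pvLbl labels j then
      pvFlagsA labels amb thr rest (cur ++ [(j : Int)]) (if (j : Int) ∈ amb then cnt + 1 else cnt)
    else if cnt > thr then cur :: pvFlagsA labels amb thr rest [(j : Int)] 0
    else pvFlagsA labels amb thr rest [(j : Int)] 0

-- B's per-group count
def pvCnt (amb : List Int) (g : List Int) : Nat := g.countP (fun i => decide (i ∈ amb))

-- loop invariant tying A's running counter to B's count of the open group
def pvInv (labels : List String) (amb : List Int) (k : Nat) (cur : List Int) (cnt : Int) : Prop :=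
  cnt = (pvCnt amb cur : Int) ∨
  (∃ s : Nat, 0 < s ∧ s < k ∧ cur = (List.range' s (k - s)).map (fun (j : Nat) => (j : Int)) ∧
    pvLbl labels (s - 1) ≠ pvLbl labels s ∧
    (∀ j : Nat, s < j → j < k → pvLbl labels j = pvLbl labels (j - 1)) ∧
    ((s : Int) ∈ amb) ∧ cnt + 1 = (pvCnt amb cur : Int))

theorem pv_enum_eq (labels : List String) :
    PySem.List.enumerate labels
      = (List.range labels.length).map (fun (j : Nat) => ((j : Int), pvLbl labels j)) := by
  rw [PySem.List.enumerate_eq_map_pyRange labels ""]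
  have hlen : PySem.List.len labels = (labels.length : Int) := rfl
  rw [hlen, PySem.List.pyRange_zero_natCast, List.map_map]
  refine List.map_congr_left ?_
  intro j _
  simp [Function.comp, PySem.List.pyGetD_natCast, pvLbl]

theorem pv_test_iff (labels : List String) (j : Nat) (hj : j < labels.length) :
    ((j : Int) = 0 ∨ PySem.List.pyGet? labels ((j : Int) - 1) = some (pvLbl labels j))
      ↔ (j = 0 ∨ pvLbl labels (j - 1) = pvLbl labels j) := by
  rcases Nat.eq_zero_or_pos j with h0 | hpos
  · subst h0; simp
  · have h1 : (j : Int) - 1 = ((j - 1 : Nat) : Int) := by omega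
    have h2 : j ≠ 0 := by omega
    have hg : pvLbl labels (j - 1) = labels[j - 1]'(by omega) :=
      List.getD_eq_getElem labels "" (by omega)
    rw [h1, PySem.List.pyGet?_natCast, List.getElem?_eq_getElem (by omega : j - 1 < labels.length)]
    constructor
    · rintro (hc | hc)
      · exact absurd (by exact_mod_cast hc) h2
      · exact Or.inr (by rw [hg]; exact Option.some.inj hc)
    · rintro (hc | hc)
      · exact absurd hc h2
      · exact Or.inr (by rw [← hg, hc])

theorem pvALoop_eq (labels : List String) (amb : List Int) (thr : Int) :
    ∀ (js : List Nat) (groups ambg : List (List Int)) (cur : List Int) (cnt : Int),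
      (∀ j ∈ js, j < labels.length) →
      pvALoop labels amb thr (js.map (fun (j : Nat) => ((j : Int), pvLbl labels j))) groups ambg cur cnt
        = (groups ++ pvRuns labels js cur, ambg ++ pvFlagsA labels amb thr js cur cnt) := by
  intro js
  induction js with
  | nil =>
    intro groups ambg cur cnt _
    simp only [List.map_nil, pvALoop, pvRuns, pvFlagsA]
    split_ifs <;> simp
  | cons j rest ih =>
    intro groups ambg cur cnt hall
    have hj : j < labels.length := hall j (List.mem_cons_self ..)
    have hrest : ∀ x ∈ rest, x < labels.length := fun x hx => hall x (List.mem_cons_of_mem _ hx)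
    simp only [List.map_cons, pvALoop, pvRuns, pvFlagsA]
    by_cases h : j = 0 ∨ pvLbl labels (j - 1) = pvLbl labels j
    · rw [if_pos ((pv_test_iff labels j hj).mpr h), if_pos h, if_pos h, ih _ _ _ _ hrest]
    · rw [if_neg (fun hc => h ((pv_test_iff labels j hj).mp hc)), if_neg h, if_neg h,
        ih _ _ _ _ hrest]
      split_ifs <;> simp

theorem pvBGroups_eq (labels : List String) :
    ∀ (js : List Nat) (groups : List (List Int)) (cur : List Int),
      (∀ j ∈ js, j < labels.length) →
      pvBGroups labels (js.map (fun (j : Nat) => ((j : Int), pvLbl labels j))) groups cur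
        = groups ++ pvRuns labels js cur := by
  intro js
  induction js with
  | nil => intro groups cur _; simp [pvBGroups, pvRuns]
  | cons j rest ih =>
    intro groups cur hall
    have hj : j < labels.length := hall j (List.mem_cons_self ..)
    have hrest : ∀ x ∈ rest, x < labels.length := fun x hx => hall x (List.mem_cons_of_mem _ hx)
    simp only [List.map_cons, pvBGroups, pvRuns]
    by_cases h : j = 0 ∨ pvLbl labels (j - 1) = pvLbl labels j
    · rw [if_pos ((pv_test_iff labels j hj).mpr h), if_pos h, ih _ _ hrest]
    · rw [if_neg (fun hc => h ((pv_test_iff labels j hj).mp hc)), if_neg h, ih _ _ hrest]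
      simp

theorem pv_bcount_eq (amb : List Int) (g : List Int) :
    ((g.filter (fun i => (PySem.Set.ofList amb).contains i)).map (fun _ => (1 : Int))).sum
      = (pvCnt amb g : Int) := by
  rw [PySem.List.sum_map_const_int]
  have hp : (fun i => (PySem.Set.ofList amb).contains i) = (fun i : Int => decide (i ∈ amb)) := by
    funext i
    by_cases h : i ∈ amb <;>
      simp [PySem.Set.contains, PySem.Set.mem_ofList, h]
  rw [mul_one, hp]
  simp [pvCnt, List.countP_eq_length_filter]

theorem pv_cnt_append_one (amb : List Int) (cur : List Int) (x : Int) :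
    (pvCnt amb (cur ++ [x]) : Int)
      = (pvCnt amb cur : Int) + (if x ∈ amb then 1 else 0) := by
  by_cases hm : x ∈ amb <;>
    simp [pvCnt, List.countP_append, List.countP_nil, hm]

theorem pv_range_cnt (amb : List Int) (s m : Nat) :
    ((List.range' s m).countP (fun i => decide (Int.ofNat i ∈ amb)))
      = pvCnt amb ((List.range' s m).map (fun (j : Nat) => (j : Int))) := by
  show _ = List.countP (fun i : Int => decide (i ∈ amb))
      ((List.range' s m).map (fun (j : Nat) => (j : Int)))
  rw [List.countP_map]
  rfl

theorem pv_takeWhile_len {α : Type} (p : α → Bool) :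
    ∀ (l : List α) (m : Nat), m ≤ l.length →
      (∀ i, i < m → ∀ h : i < l.length, p (l[i]'h) = true) →
      (m = l.length ∨ ∀ h : m < l.length, p (l[m]'h) = false) →
      (l.takeWhile p).length = m := by
  intro l
  induction l with
  | nil =>
    intro m hm _ _
    simp only [List.takeWhile_nil, List.length_nil]
    simp at hm
    omega
  | cons a t ih =>
    intro m hm hall hstop
    cases m with
    | zero =>
      rcases hstop with h | h
      · simp at h
      · have hpa : p a = false := h (by simp)
        simp [hpa]
    | succ m' =>
      have hpa : p a = true := hall 0 (Nat.succ_pos _) (by simp)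
      have hall' : ∀ i, i < m' → ∀ h : i < t.length, p (t[i]'h) = true := by
        intro i hi h
        exact hall (i + 1) (by omega) (by simpa using Nat.succ_lt_succ h)
      have hstop' : m' = t.length ∨ ∀ h : m' < t.length, p (t[m']'h) = false := by
        rcases hstop with h | h
        · left; simpa using h
        · right
          intro hm'
          exact h (by simpa using Nat.succ_lt_succ hm')
      have hih := ih m' (by simpa using hm) hall' hstop'
      simp [hpa, hih]

theorem pv_runAmb_eq (labels : List String) (amb : List Int) (s k : Nat) (hsk : s < k)
    (hk : k ≤ labels.length)
    (hrun : ∀ j, s < j → j < k → pvLbl labels j = pvLbl labels (j - 1))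
    (hstop : k = labels.length ∨ pvLbl labels k ≠ pvLbl labels (k - 1)) :
    pvRunAmb labels amb s
      = (pvCnt amb ((List.range' s (k - s)).map (fun (j : Nat) => (j : Int))) : Int) := by
  have hconst : ∀ j, s ≤ j → j < k → pvLbl labels j = pvLbl labels s := by
    intro j hsj
    induction j, hsj using Nat.le_induction with
    | base => intro _; rfl
    | succ j hj ihj =>
      intro hjk
      have h1 : pvLbl labels (j + 1) = pvLbl labels j := by
        simpa using hrun (j + 1) (by omega) hjk
      rw [h1]
      exact ihj (by omega)
  unfold pvRunAmb
  have hlen : ((labels.drop s).takeWhile (fun t => decide (t = labels.getD s ""))).length = k - s := by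
    apply pv_takeWhile_len
    · rw [List.length_drop]; omega
    · intro i hi h
      have h' : i < labels.length - s := by simpa [List.length_drop] using h
      have h2 : labels.getD (s + i) "" = labels.getD s "" := hconst (s + i) (by omega) (by omega)
      have h3 : (labels.drop s)[i]'h = labels.getD (s + i) "" := by
        rw [List.getElem_drop]
        exact (List.getD_eq_getElem labels "" (by omega)).symm
      rw [h3, h2]
      simp
    · rcases hstop with h | h
      · left; rw [List.length_drop]; omega
      · right
        intro hm
        have hklen : k < labels.length := by
          have := hm
          rw [List.length_drop] at this
          omega
        have harith : s + (k - s) = k := by omega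
        have h3 : (labels.drop s)[k - s]'hm = labels.getD k "" := by
          rw [List.getElem_drop, ← List.getD_eq_getElem labels "" (by omega), harith]
        have h4 : labels.getD k "" ≠ labels.getD s "" := by
          intro hx
          apply h
          have h5 : pvLbl labels (k - 1) = pvLbl labels s := hconst (k - 1) (by omega) (by omega)
          show pvLbl labels k = pvLbl labels (k - 1)
          rw [h5]
          exact hx
        rw [h3]
        exact decide_eq_false h4
  rw [hlen, pv_range_cnt]

theorem pv_main (labels : List String) (amb : List Int) (thr : Int)
    (hD : ¬ D_obtain_groups_and_ambiguous_groups_from_labels labels amb thr) :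
    ∀ (m k : Nat) (cur : List Int) (cnt : Int), k + m = labels.length →
      pvInv labels amb k cur cnt →
      pvFlagsA labels amb thr (List.range' k m) cur cnt
        = (pvRuns labels (List.range' k m) cur).filter
            (fun g => decide ((pvCnt amb g : Int) > thr)) := by
  intro m
  induction m with
  | zero =>
    intro k cur cnt hk hinv
    simp only [List.range'_zero, pvFlagsA, pvRuns, List.filter_cons, List.filter_nil,
      decide_eq_true_eq]
    rcases hinv with h1 | ⟨s, hs0, hsk, hcur, hbrk, hrun, hsamb, hcnt⟩
    · rw [h1]
    · have hne : (pvCnt amb cur : Int) ≠ thr + 1 := by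
        intro heq
        apply hD
        unfold D_obtain_groups_and_ambiguous_groups_from_labels
        refine ⟨s, List.mem_range.mpr (by omega), hbrk, hsamb, ?_⟩
        rw [pv_runAmb_eq labels amb s k hsk (by omega) hrun (Or.inl (by omega)), ← hcur]
        exact heq
      by_cases hgt : (pvCnt amb cur : Int) > thr
      · rw [if_pos (by omega), if_pos hgt]
      · rw [if_neg (by omega), if_neg hgt]
  | succ m ihm =>
    intro k cur cnt hk hinv
    rw [List.range'_succ]
    simp only [pvFlagsA, pvRuns]
    by_cases h : k = 0 ∨ pvLbl labels (k - 1) = pvLbl labels k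
    · rw [if_pos h, if_pos h]
      apply ihm (k + 1) _ _ (by omega)
      rcases hinv with h1 | ⟨s, hs0, hsk, hcur, hbrk, hrun, hsamb, hcnt⟩
      · left
        rw [pv_cnt_append_one, ← h1]
        by_cases hm : (k : Int) ∈ amb <;> simp [hm]
      · right
        refine ⟨s, hs0, by omega, ?_, hbrk, ?_, hsamb, ?_⟩
        · rw [hcur]
          have h1 : k + 1 - s = (k - s) + 1 := by omega
          have h2 : s + (k - s) = k := by omega
          rw [h1, List.range'_1_concat, List.map_append, h2]
          rfl
        · intro j hsj hjk1
          rcases Nat.lt_or_ge j k with hjlt | hjge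
          · exact hrun j hsj hjlt
          · have hjk : j = k := by omega
            subst hjk
            rcases h with h0 | heq
            · omega
            · exact heq.symm
        · rw [pv_cnt_append_one, ← hcnt]
          by_cases hm : (k : Int) ∈ amb <;> simp [hm]
    · rw [if_neg h, if_neg h]
      rw [not_or] at h
      obtain ⟨hk0, hne⟩ := h
      have hinv' : pvInv labels amb (k + 1) [(k : Int)] 0 := by
        by_cases hm : (k : Int) ∈ amb
        · right
          refine ⟨k, Nat.pos_of_ne_zero hk0, by omega, ?_, hne, ?_, hm, ?_⟩
          · simp [List.range'_one]
          · intro j hj1 hj2; omega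
          · simp [pvCnt, List.countP_nil, hm]
        · left
          simp [pvCnt, List.countP_nil, hm]
      have hrec := ihm (k + 1) [(k : Int)] 0 (by omega) hinv'
      have hagree : (cnt > thr) ↔ ((pvCnt amb cur : Int) > thr) := by
        rcases hinv with h1 | ⟨s, hs0, hsk, hcur, hbrk, hrun, hsamb, hcnt⟩
        · rw [h1]
        · have hne' : (pvCnt amb cur : Int) ≠ thr + 1 := by
            intro heq
            apply hD
            unfold D_obtain_groups_and_ambiguous_groups_from_labels
            refine ⟨s, List.mem_range.mpr (by omega), hbrk, hsamb, ?_⟩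
            rw [pv_runAmb_eq labels amb s k hsk (by omega) hrun
                  (Or.inr (fun hx => hne hx.symm)), ← hcur]
            exact heq
          omega
      rw [hrec, List.filter_cons]
      simp only [decide_eq_true_eq]
      by_cases hgt : (pvCnt amb cur : Int) > thr
      · rw [if_pos (hagree.mpr hgt), if_pos hgt]
      · rw [if_neg (fun hc => hgt (hagree.mp hc)), if_neg hgt]

theorem pv_takeWhile_le {α : Type} (p : α → Bool) (l : List α) :
    (l.takeWhile p).length ≤ l.length := by
  induction l with
  | nil => simp
  | cons a t ih =>
    by_cases h : p a = true
    · simp [h]; omega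
    · simp [h]

theorem pv_takeWhile_idx {α : Type} (p : α → Bool) :
    ∀ l : List α,
      (∀ i, ∀ hi : i < (l.takeWhile p).length, ∀ h : i < l.length, p (l[i]'h) = true) ∧
      (∀ h : (l.takeWhile p).length < l.length, p (l[(l.takeWhile p).length]'h) = false) := by
  intro l
  induction l with
  | nil =>
    exact ⟨fun i _ h => absurd h (by simp), fun h => absurd h (by simp)⟩
  | cons a t ih =>
    by_cases hpa : p a = true
    · have ht : (a :: t).takeWhile p = a :: t.takeWhile p := by
        simp [hpa]
      constructor
      · intro i hi h
        cases i with
        | zero => exact hpa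
        | succ n =>
          rw [ht] at hi
          exact ih.1 n (by simpa using hi) (by simpa using h)
      · intro h
        have hlen : ((a :: t).takeWhile p).length = (t.takeWhile p).length + 1 := by
          rw [ht]; rfl
        have h' : (t.takeWhile p).length < t.length := by
          have := h
          rw [hlen] at this
          simpa using this
        have := ih.2 h'
        simp only [hlen, List.getElem_cons_succ]
        exact this
    · have hpa' : p a = false := by revert hpa; cases p a <;> simp
      have ht : (a :: t).takeWhile p = [] := by simp [hpa']
      refine ⟨fun i hi _ => absurd hi (by simp [ht]), fun h => ?_⟩
      simp only [ht, List.length_nil, List.getElem_cons_zero]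
      exact hpa'

theorem pv_flags_le (labels : List String) (amb : List Int) (thr : Int) :
    ∀ (m k : Nat) (cur : List Int) (cnt : Int), cnt ≤ (pvCnt amb cur : Int) →
      (pvFlagsA labels amb thr (List.range' k m) cur cnt).length
        ≤ ((pvRuns labels (List.range' k m) cur).filter
            (fun g => decide ((pvCnt amb g : Int) > thr))).length := by
  intro m
  induction m with
  | zero =>
    intro k cur cnt hle
    simp only [List.range'_zero, pvFlagsA, pvRuns, List.filter_cons, List.filter_nil,
      decide_eq_true_eq]
    by_cases h1 : cnt > thr
    · rw [if_pos h1, if_pos (by omega)]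
    · rw [if_neg h1]
      split_ifs <;> simp
  | succ m ihm =>
    intro k cur cnt hle
    rw [List.range'_succ]
    simp only [pvFlagsA, pvRuns]
    by_cases h : k = 0 ∨ pvLbl labels (k - 1) = pvLbl labels k
    · rw [if_pos h, if_pos h]
      apply ihm
      rw [pv_cnt_append_one]
      by_cases hm : (k : Int) ∈ amb <;> simp [hm] <;> omega
    · rw [if_neg h, if_neg h, List.filter_cons]
      have hIH := ihm (k + 1) [((k : Int))] 0 (Int.natCast_nonneg _)
      simp only [decide_eq_true_eq]
      by_cases h1 : cnt > thr
      · rw [if_pos h1, if_pos (by omega)]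
        simpa using Nat.succ_le_succ hIH
      · rw [if_neg h1]
        split_ifs with h2
        · simp only [List.length_cons]
          omega
        · exact hIH

theorem pv_tight_main (labels : List String) (amb : List Int) (thr : Int) (s L : Nat)
    (hsn : s < labels.length) (hL1 : 1 ≤ L) (hLle : s + L ≤ labels.length)
    (hbrk : labels.getD (s - 1) "" ≠ labels.getD s "")
    (hrun : ∀ i, i < L → labels.getD (s + i) "" = labels.getD s "")
    (hstop : s + L = labels.length ∨ labels.getD (s + L) "" ≠ labels.getD s "")
    (hsamb : (s : Int) ∈ amb)
    (hcount : (pvCnt amb ((List.range' s L).map (fun (j : Nat) => (j : Int))) : Int) = thr + 1) :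
    ∀ (m k : Nat) (cur : List Int) (cnt : Int), k + m = labels.length →
      ((k ≤ s ∧ cnt ≤ (pvCnt amb cur : Int)) ∨
        (s < k ∧ k ≤ s + L ∧ cur = (List.range' s (k - s)).map (fun (j : Nat) => (j : Int)) ∧
          cnt + 1 = (pvCnt amb cur : Int))) →
      (pvFlagsA labels amb thr (List.range' k m) cur cnt).length
        < ((pvRuns labels (List.range' k m) cur).filter
            (fun g => decide ((pvCnt amb g : Int) > thr))).length := by
  intro m
  induction m with
  | zero =>
    intro k cur cnt hk hph
    rcases hph with ⟨hks, _⟩ | ⟨hsk, hke, hcur, hcnt⟩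
    · omega
    · have hks : k - s = L := by omega
      rw [hks] at hcur
      have hcN : (pvCnt amb cur : Int) = thr + 1 := by rw [hcur]; exact hcount
      simp only [List.range'_zero, pvFlagsA, pvRuns, List.filter_cons, List.filter_nil,
        decide_eq_true_eq]
      rw [if_neg (by omega), if_pos (by omega)]
      simp
  | succ m ihm =>
    intro k cur cnt hk hph
    rw [List.range'_succ]
    simp only [pvFlagsA, pvRuns]
    rcases hph with ⟨hks, hle⟩ | ⟨hsk, hke, hcur, hcnt⟩
    · rcases Nat.lt_or_ge k s with hklt | hkge
      · by_cases h : k = 0 ∨ pvLbl labels (k - 1) = pvLbl labels k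
        · rw [if_pos h, if_pos h]
          apply ihm (k + 1) _ _ (by omega)
          left
          refine ⟨by omega, ?_⟩
          rw [pv_cnt_append_one]
          by_cases hm : (k : Int) ∈ amb <;> simp [hm] <;> omega
        · rw [if_neg h, if_neg h, List.filter_cons]
          have hIH := ihm (k + 1) [((k : Int))] 0 (by omega)
            (Or.inl ⟨by omega, Int.natCast_nonneg _⟩)
          simp only [decide_eq_true_eq]
          by_cases h1 : cnt > thr
          · rw [if_pos h1, if_pos (by omega)]
            simpa using Nat.succ_lt_succ hIH
          · rw [if_neg h1]
            split_ifs with h2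
            · simp only [List.length_cons]
              omega
            · exact hIH
      · have hkeq : k = s := by omega
        subst hkeq
        have hnot : ¬ (k = 0 ∨ pvLbl labels (k - 1) = pvLbl labels k) := by
          rintro (rfl | hx)
          · exact hbrk rfl
          · exact hbrk hx
        rw [if_neg hnot, if_neg hnot, List.filter_cons]
        have hcur1 : [((k : Int))] = (List.range' k (k + 1 - k)).map (fun (j : Nat) => (j : Int)) := by
          have h1 : k + 1 - k = 1 := by omega
          rw [h1, List.range'_one]
          rfl
        have hcnt1 : (0 : Int) + 1 = (pvCnt amb [((k : Int))] : Int) := by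
          simp [pvCnt, hsamb]
        have hIH := ihm (k + 1) [((k : Int))] 0 (by omega)
          (Or.inr ⟨by omega, by omega, hcur1, hcnt1⟩)
        simp only [decide_eq_true_eq]
        by_cases h1 : cnt > thr
        · rw [if_pos h1, if_pos (by omega)]
          simpa using Nat.succ_lt_succ hIH
        · rw [if_neg h1]
          split_ifs with h2
          · simp only [List.length_cons]
            omega
          · exact hIH
    · rcases Nat.lt_or_ge k (s + L) with hklt | hkge
      · have hgk : labels.getD k "" = labels.getD s "" := by
          have := hrun (k - s) (by omega)
          rwa [show s + (k - s) = k from by omega] at this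
        have hgk1 : labels.getD (k - 1) "" = labels.getD s "" := by
          have := hrun (k - 1 - s) (by omega)
          rwa [show s + (k - 1 - s) = k - 1 from by omega] at this
        have hcond : k = 0 ∨ pvLbl labels (k - 1) = pvLbl labels k :=
          Or.inr (hgk1.trans hgk.symm)
        rw [if_pos hcond, if_pos hcond]
        apply ihm (k + 1) _ _ (by omega)
        right
        refine ⟨by omega, by omega, ?_, ?_⟩
        · rw [hcur]
          have h1 : k + 1 - s = (k - s) + 1 := by omega
          have h2 : s + (k - s) = k := by omega
          rw [h1, List.range'_1_concat, List.map_append, h2]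
          rfl
        · rw [pv_cnt_append_one, ← hcnt]
          by_cases hm : (k : Int) ∈ amb <;> simp [hm]
      · have hkeq : k = s + L := by omega
        have hknn : k < labels.length := by omega
        have hge : labels.getD (k - 1) "" = labels.getD s "" := by
          have := hrun (L - 1) (by omega)
          rwa [show s + (L - 1) = k - 1 from by omega] at this
        have hstp : labels.getD k "" ≠ labels.getD s "" := by
          rcases hstop with h | h
          · exact absurd h (by omega)
          · rwa [← hkeq] at h
        have hnot : ¬ (k = 0 ∨ pvLbl labels (k - 1) = pvLbl labels k) := by
          rintro (rfl | hx)
          · omega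
          · exact hstp (hx.symm.trans hge)
        rw [if_neg hnot, if_neg hnot, List.filter_cons]
        have hcurL : cur = (List.range' s L).map (fun (j : Nat) => (j : Int)) := by
          rw [hcur, show k - s = L from by omega]
        have hcN : (pvCnt amb cur : Int) = thr + 1 := by rw [hcurL]; exact hcount
        have hIH := pv_flags_le labels amb thr m (k + 1) [((k : Int))] 0 (Int.natCast_nonneg _)
        simp only [decide_eq_true_eq]
        rw [if_neg (by omega : ¬ cnt > thr), if_pos (by omega : (pvCnt amb cur : Int) > thr)]
        simp only [List.length_cons]
        omega

theorem pv_D_facts (labels : List String) (amb : List Int) (thr : Int) (s : Nat)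
    (hsn : s < labels.length)
    (hcnt : pvRunAmb labels amb s = thr + 1) :
    ∃ L : Nat, 1 ≤ L ∧ s + L ≤ labels.length ∧
      (∀ i, i < L → labels.getD (s + i) "" = labels.getD s "") ∧
      (s + L = labels.length ∨ labels.getD (s + L) "" ≠ labels.getD s "") ∧
      (pvCnt amb ((List.range' s L).map (fun (j : Nat) => (j : Int))) : Int) = thr + 1 := by
  refine ⟨((labels.drop s).takeWhile (fun t => decide (t = labels.getD s ""))).length,
    ?_, ?_, ?_, ?_, ?_⟩
  · have hps : labels[s] = labels.getD s "" := (List.getD_eq_getElem labels "" hsn).symm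
    rw [List.drop_eq_getElem_cons hsn, List.takeWhile_cons]
    simp [hps]
  · have := pv_takeWhile_le (fun t => decide (t = labels.getD s "")) (labels.drop s)
    rw [List.length_drop] at this
    omega
  · intro i hi
    have hidx : i < (labels.drop s).length := lt_of_lt_of_le hi (pv_takeWhile_le _ _)
    have h1 := (pv_takeWhile_idx (fun t => decide (t = labels.getD s "")) (labels.drop s)).1 i hi hidx
    rw [List.getElem_drop] at h1
    have hb : s + i < labels.length := by
      rw [List.length_drop] at hidx
      omega
    rw [List.getD_eq_getElem labels "" hb]
    exact of_decide_eq_true h1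
  · by_cases hL : ((labels.drop s).takeWhile (fun t => decide (t = labels.getD s ""))).length
        < (labels.drop s).length
    · right
      have h1 := (pv_takeWhile_idx (fun t => decide (t = labels.getD s "")) (labels.drop s)).2 hL
      rw [List.getElem_drop] at h1
      have hb : s + ((labels.drop s).takeWhile (fun t => decide (t = labels.getD s ""))).length
          < labels.length := by
        rw [List.length_drop] at hL
        omega
      have hval : labels[s + ((labels.drop s).takeWhile
            (fun t => decide (t = labels.getD s ""))).length]'hb
          = labels.getD (s + ((labels.drop s).takeWhile
            (fun t => decide (t = labels.getD s ""))).length) "" :=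
        (List.getD_eq_getElem labels "" hb).symm
      exact fun hx => (of_decide_eq_false h1) (hval.trans hx)
    · left
      rw [List.length_drop] at hL
      have := pv_takeWhile_le (fun t => decide (t = labels.getD s "")) (labels.drop s)
      rw [List.length_drop] at this
      omega
  · unfold pvRunAmb at hcnt
    rw [pv_range_cnt] at hcnt
    exact hcnt

theorem pvA_eq (labels : List String) (amb : List Int) (thr : Int) :
    obtain_groups_and_ambiguous_groups_from_labels labels amb thr
      = (pvRuns labels (List.range' 0 labels.length) [],
         pvFlagsA labels amb thr (List.range' 0 labels.length) [] 0) := by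
  unfold obtain_groups_and_ambiguous_groups_from_labels
  rw [pv_enum_eq, pvALoop_eq labels amb thr (List.range labels.length) [] [] [] 0
      (fun j hj => List.mem_range.mp hj), List.range_eq_range']
  simp

theorem pvB_eq (labels : List String) (amb : List Int) (thr : Int) :
    obtain_groups_and_ambiguous_groups_from_labels_alt labels amb thr
      = (pvRuns labels (List.range' 0 labels.length) [],
         (pvRuns labels (List.range' 0 labels.length) []).filter
           (fun g => decide ((pvCnt amb g : Int) > thr))) := by
  unfold obtain_groups_and_ambiguous_groups_from_labels_alt
  simp only [pv_enum_eq]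
  rw [pvBGroups_eq labels (List.range labels.length) [] [] (fun j hj => List.mem_range.mp hj),
    List.range_eq_range']
  simp only [List.nil_append]
  congr 1
  refine List.filter_congr (fun g _ => ?_)
  rw [pv_bcount_eq amb g]

-- ===== VERDICT (by name: the statement is the Claim_ definition above) =====
theorem obtain_groups_and_ambiguous_groups_from_labels_spec : Claim_unchanged_obtain_groups_and_ambiguous_groups_from_labels := by
  intro labels amb thr _ hD
  have hmain := pv_main labels amb thr hD labels.length 0 [] 0 (by omega)
    (Or.inl (by simp [pvCnt]))
  show _ = _
  rw [pvA_eq, pvB_eq, hmain]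

theorem obtain_groups_and_ambiguous_groups_from_labels_changed : Claim_changed_obtain_groups_and_ambiguous_groups_from_labels := by
  unfold Claim_changed_obtain_groups_and_ambiguous_groups_from_labels; decide

theorem obtain_groups_and_ambiguous_groups_from_labels_tight : Claim_exact_obtain_groups_and_ambiguous_groups_from_labels := by
  intro labels amb thr _ hDh
  have hDh' : ∃ s ∈ List.range labels.length,
      labels.getD (s - 1) "" ≠ labels.getD s "" ∧ (s : Int) ∈ amb ∧
      pvRunAmb labels amb s = thr + 1 := hDh
  obtain ⟨s, hmem, hbrk, hsamb, hcnt⟩ := hDh'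
  have hsn : s < labels.length := List.mem_range.mp hmem
  obtain ⟨L, hL1, hLle, hrun, hstop, hcount⟩ := pv_D_facts labels amb thr s hsn hcnt
  intro hEq
  rw [pvA_eq, pvB_eq] at hEq
  have h2 : pvFlagsA labels amb thr (List.range' 0 labels.length) [] 0
      = (pvRuns labels (List.range' 0 labels.length) []).filter
          (fun g => decide ((pvCnt amb g : Int) > thr)) := congrArg Prod.snd hEq
  have hlt := pv_tight_main labels amb thr s L hsn hL1 hLle hbrk hrun hstop hsamb hcount
    labels.length 0 [] 0 (by omega) (Or.inl ⟨Nat.zero_le _, by simp [pvCnt]⟩)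
  rw [h2] at hlt
  exact lt_irrefl _ hlt
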